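-- pv_equiv track=rewrite | github.com/literally-user/Friday-Tasks | tasks/qword/pycckuu_bop/main.py | F
-- ===== SOURCE A (Python) =====
-- from math import isqrt
--
-- def F(n):
--     if n <= 0:
--         return (0, 0, 0, 0)
--
--     s = isqrt(n)
--     for i in range(0, s + 1):
--         a = s - i
--         x = n - a * a
--         if x == 0:
--             return (a, 0, 0, 0)
--
--         b = isqrt(x)
--         x -= b * b
--         if x == 0:
--             return (a, b, 0, 0)
--
--         c = isqrt(x)
--         x -= c * c
--         if x == 0:
--             return (a, b, c, 0)
--
--         d = isqrt(x)
--         x -= d * d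
--         if x == 0:
--             return (a, b, c, d)
-- ===== SOURCE B (Python) =====
-- from math import isqrt
--
-- def _peel(x, k):
--     # Greedily peel the largest square up to k times; return the list of
--     # peeled roots padded with zeros to length k, or None if no exact fit.
--     if x == 0:
--         return [0] * k
--     if k == 0:
--         return None
--     b = isqrt(x)
--     rest = _peel(x - b * b, k - 1)
--     return None if rest is None else [b] + rest
--
-- def F(n):
--     if n <= 0:
--         return (0, 0, 0, 0)
--     s = isqrt(n)
--     for a in range(s, -1, -1):
--         rest = _peel(n - a * a, 3)
--         if rest is not None:
--             return (a, rest[0], rest[1], rest[2])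
-- ===== Notes on version B (the rewrite author's own statement) =====
-- stated objective: simpler
-- what changed: A's three unrolled isqrt-and-subtract blocks with four staggered early returns are replaced by one recursive greedy helper _peel(x, k) that peels up to k largest squares (zero-padded) and an outer countdown loop over a from s down to zero.
import Mathlib
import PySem

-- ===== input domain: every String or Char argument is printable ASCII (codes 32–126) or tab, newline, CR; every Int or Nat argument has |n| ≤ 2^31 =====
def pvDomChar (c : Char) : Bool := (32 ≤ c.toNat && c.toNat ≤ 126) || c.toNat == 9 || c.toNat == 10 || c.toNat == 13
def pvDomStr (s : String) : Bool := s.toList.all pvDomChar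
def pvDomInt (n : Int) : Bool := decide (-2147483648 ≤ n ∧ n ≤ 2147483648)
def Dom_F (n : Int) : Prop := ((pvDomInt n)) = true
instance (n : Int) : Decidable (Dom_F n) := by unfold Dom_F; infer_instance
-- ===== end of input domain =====

-- B replaces A's three unrolled isqrt-and-subtract blocks with one recursive greedy
-- peeling helper and a countdown loop over a (objective: simpler; same behaviour).

-- math.isqrt for nonnegative arguments (both Pythons only apply it to x ≥ 0)
def pyIsqrt (x : Int) : Int := (Nat.sqrt x.toNat : Int)

-- ===== PORT A =====
-- early-exit loop over i ∈ range(0, s+1)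
def F_loopA (n s : Int) : List Int → Option (Int × Int × Int × Int)
  | [] => none
  | i :: rest =>
    let a := s - i
    let x := n - a * a
    if x = 0 then some (a, 0, 0, 0)
    else
      let b := pyIsqrt x
      let x := x - b * b
      if x = 0 then some (a, b, 0, 0)
      else
        let c := pyIsqrt x
        let x := x - c * c
        if x = 0 then some (a, b, c, 0)
        else
          let d := pyIsqrt x
          let x := x - d * d
          if x = 0 then some (a, b, c, d)
          else F_loopA n s rest

def F (n : Int) : Option (Int × Int × Int × Int) :=
  if n ≤ 0 then some (0, 0, 0, 0)
  else
    let s := pyIsqrt n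
    F_loopA n s (PySem.List.pyRange 0 (s + 1) 1)

-- ===== PORT B =====
-- greedy peel of up to k largest squares, zeros-padded; none if no exact fit
def F_peel (x : Int) : Nat → Option (List Int)
  | 0 => if x = 0 then some [] else none
  | k + 1 =>
    if x = 0 then some (List.replicate (k + 1) 0)
    else
      let b := pyIsqrt x
      (F_peel (x - b * b) k).map (b :: ·)

-- early-exit loop over a ∈ range(s, -1, -1)
def F_loopB (n : Int) : List Int → Option (Int × Int × Int × Int)
  | [] => none
  | a :: rest =>
    match F_peel (n - a * a) 3 with
    | some [b, c, d] => some (a, b, c, d)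
    | _ => F_loopB n rest

def F_alt (n : Int) : Option (Int × Int × Int × Int) :=
  if n ≤ 0 then some (0, 0, 0, 0)
  else
    let s := pyIsqrt n
    F_loopB n (PySem.List.pyRange s (-1) (-1))

-- ===== PRECONDITION & SPEC =====
def Spec_F (n : Int) (out : Option (Int × Int × Int × Int)) : Prop := out = F_alt n
instance (n : Int) (out : Option (Int × Int × Int × Int)) : Decidable (Spec_F n out) := by unfold Spec_F; infer_instance

-- ===== CLAIM (what is proved, stated in full; the proofs are below) =====
def Claim_equal_F : Prop := ∀ (n : Int), Dom_F n → Spec_F n (F n)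

-- ===== LEMMAS AND PROOFS =====

-- the two loop bodies agree pointwise (A indexes by i with a = s - i; B by a directly)
theorem loop_eq (n s : Int) (l : List Int) :
    F_loopA n s l = F_loopB n (l.map (fun i => s - i)) := by
  induction l with
  | nil => simp [F_loopA, F_loopB]
  | cons i rest ih =>
    simp only [List.map_cons, F_loopA, F_loopB, F_peel]
    split_ifs with h0 h1 h2 h3 <;> simp [ih]

theorem range_map (s : Int) :
    (PySem.List.pyRange 0 (s + 1) 1).map (fun i => s - i) = PySem.List.pyRange s (-1) (-1) := by
  rw [PySem.List.pyRange_one, PySem.List.pyRange_neg_one]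
  have h : s + 1 - 0 = s - -1 := by ring
  rw [h, List.map_map]
  apply List.map_congr_left
  intro k hk
  simp

-- ===== VERDICT (by name: the statement is the Claim_ definition above) =====
theorem F_spec : Claim_equal_F := by
  intro n _
  unfold Spec_F F F_alt
  by_cases h : n ≤ 0
  · simp [h]
  · simp only [h, if_false]
    rw [loop_eq, range_map]
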